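-- pv_equiv track=rewrite | github.com/ckchng/ROSIA | MPA/MPA_mag.py | find_pole_in_pairs
-- ===== SOURCE A (Python) =====
-- def find_pole_in_pairs(pairs):
--     index_counts = []
--     counts = {}
--     max_count_ids = []
--
--     for distance in pairs:
--         index_counts.append([])
--         for pair in distance:
--             for star_id in pair[1]:
--                 if star_id not in index_counts[-1]:
--                     index_counts[-1].append(star_id)
--                     if star_id in list(counts.keys()):
--                         counts[star_id] += 1
--                     else:
--                         counts[star_id] = 1
--     if len(counts) > 1:
--         max_count = max(list(counts.values()))
--     else:
--         max_count = 0
--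
--     for i, count in enumerate(list(counts.values())):
--         if count == max_count:
--             max_count_ids.append(list(counts.keys())[i])
--     if len(max_count_ids) > 1 or max_count < 3:
--         return -1
--
--     return max_count_ids[0]
-- ===== SOURCE B (Python) =====
-- def find_pole_in_pairs(pairs):
--     counts = {}
--     for distance in pairs:
--         group = set()
--         for pair in distance:
--             group.update(pair[1])
--         for star_id in group:
--             counts[star_id] = counts.get(star_id, 0) + 1
--     if len(counts) < 2:
--         return -1
--     ranked = sorted(counts.items(), key=lambda item: item[1], reverse=True)
--     top_id, top = ranked[0]
--     if top >= 3 and top > ranked[1][1]: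
--         return top_id
--     return -1
-- ===== Notes on version B (the rewrite author's own statement) =====
-- stated objective: faster
-- what changed: Replaces A's interleaved per-group dedup-list membership scans and per-id list(counts.keys()) rebuild, plus the enumerate-and-collect-all-maxima pass, by a separate pipeline: build each group's id set, aggregate counts in one dict via get(), then sort the items by count descending and decide the winner from the top two entries.
import Mathlib
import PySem

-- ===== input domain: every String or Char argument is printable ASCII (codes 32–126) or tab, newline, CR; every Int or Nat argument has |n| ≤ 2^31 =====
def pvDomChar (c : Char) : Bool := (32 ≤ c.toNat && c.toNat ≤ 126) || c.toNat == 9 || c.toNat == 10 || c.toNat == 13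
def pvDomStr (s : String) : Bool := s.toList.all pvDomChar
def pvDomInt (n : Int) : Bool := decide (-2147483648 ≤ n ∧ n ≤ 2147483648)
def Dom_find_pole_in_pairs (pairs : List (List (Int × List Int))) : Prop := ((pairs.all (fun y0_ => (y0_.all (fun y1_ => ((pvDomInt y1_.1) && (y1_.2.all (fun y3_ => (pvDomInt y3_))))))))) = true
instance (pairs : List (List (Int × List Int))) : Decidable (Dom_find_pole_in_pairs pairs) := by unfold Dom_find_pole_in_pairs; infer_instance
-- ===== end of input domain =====

-- B replaces A's interleaved dedup-list/dict-key-scan counting and collect-all-maxima pass by a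
-- separate pipeline: per-group id set, one counting dict, then a sort by count and a top-two test
-- (objective: faster — avoids A's per-id list scans; a timing run measured B faster).

-- ===== PORT A =====
-- One step of A's innermost loop. The state is (counts, index_counts[-1]): Python's index_counts
-- keeps one dedup list per distance group but only ever reads the last one (index_counts[-1]),
-- so the dead earlier lists are not carried.
def pvAStep (st : PySem.Dict Int Int × List Int) (star_id : Int) : PySem.Dict Int Int × List Int :=
  if star_id ∈ st.2 then st
  else if star_id ∈ st.1.keys then (st.1.insert star_id (st.1.getD star_id 0 + 1), st.2 ++ [star_id])
  else (st.1.insert star_id 1, st.2 ++ [star_id])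

-- A's counting phase: for each distance group start a fresh dedup list ([] appended to
-- index_counts) and run the two inner loops.
def pvCountsA (pairs : List (List (Int × List Int))) : PySem.Dict Int Int :=
  pairs.foldl (fun counts distance =>
    (distance.foldl (fun st pair => pair.2.foldl pvAStep st) (counts, ([] : List Int))).1)
    PySem.Dict.empty

-- A's selection phase: max(values) (guarded by len(counts) > 1), collect keys of all maximal
-- counts by enumerate(values) and list(keys)[i], then the final test.
-- The pyGetD/pyGet? defaults are unreachable: i indexes values, keys has the same length, and
-- max_count_ids is nonempty whenever the else branch is taken (max_count ≥ 3 forces a maximum).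
def pvSelectA (counts : PySem.Dict Int Int) : Int :=
  let max_count : Int := if 1 < counts.size then (PySem.List.max? counts.values (fun v => v)).getD 0 else 0
  let max_count_ids : List Int := (counts.values.zipIdx).foldl
    (fun acc ci => if ci.1 = max_count then acc ++ [PySem.List.pyGetD counts.keys ((ci.2 : Nat) : Int) 0] else acc) []
  if 1 < max_count_ids.length ∨ max_count < 3 then -1
  else (PySem.List.pyGet? max_count_ids 0).getD 0

def find_pole_in_pairs (pairs : List (List (Int × List Int))) : Int :=
  pvSelectA (pvCountsA pairs)

-- ===== PORT B =====
-- counts[star_id] = counts.get(star_id, 0) + 1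
def pvInc (d : PySem.Dict Int Int) (sid : Int) : PySem.Dict Int Int := d.insert sid (d.getD sid 0 + 1)

-- B's counting phase: per group build the set of its star_ids, then bump each once.
def pvCountsB (pairs : List (List (Int × List Int))) : PySem.Dict Int Int :=
  pairs.foldl (fun counts distance =>
    let group : PySem.Set Int := distance.foldl (fun g pair => g.update pair.2) PySem.Set.empty
    group.foldl pvInc counts)
    PySem.Dict.empty

-- B's selection: sort items by count descending, compare the top two.
-- The pyGetD defaults are unreachable: ranked has length counts.size ≥ 2 in that branch.
def pvSelectB (counts : PySem.Dict Int Int) : Int :=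
  if counts.size < 2 then -1
  else
    let ranked := PySem.List.sorted counts.items (fun item => item.2) true
    let top := PySem.List.pyGetD ranked 0 (0, 0)
    if 3 ≤ top.2 ∧ (PySem.List.pyGetD ranked 1 (0, 0)).2 < top.2 then top.1 else -1

def find_pole_in_pairs_alt (pairs : List (List (Int × List Int))) : Int :=
  pvSelectB (pvCountsB pairs)

-- ===== PRECONDITION & SPEC =====
def Spec_find_pole_in_pairs (pairs : List (List (Int × List Int))) (out : Int) : Prop := out = find_pole_in_pairs_alt pairs
instance (pairs : List (List (Int × List Int))) (out : Int) : Decidable (Spec_find_pole_in_pairs pairs out) := by unfold Spec_find_pole_in_pairs; infer_instance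

-- ===== CLAIM (what is proved, stated in full; the proofs are below) =====
def Claim_equal_find_pole_in_pairs : Prop := ∀ (pairs : List (List (Int × List Int))), Dom_find_pole_in_pairs pairs → Spec_find_pole_in_pairs pairs (find_pole_in_pairs pairs)

-- ===== LEMMAS AND PROOFS =====

-- A nested fold over the groups' id lists is a fold over their concatenation.
lemma pv_foldl_flat {σ : Type} (f : σ → Int → σ) :
    ∀ (distance : List (Int × List Int)) (st : σ),
      distance.foldl (fun st pair => pair.2.foldl f st) st
        = (distance.flatMap (fun p => p.2)).foldl f st := by
  intro distance
  induction distance with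
  | nil => intro st; rfl
  | cons p t ih => intro st; simp [List.foldl_append, ih]

-- B's per-group set build is one Set.update with all the group's ids.
lemma pv_groupB_eq :
    ∀ (distance : List (Int × List Int)) (s : PySem.Set Int),
      distance.foldl (fun g pair => g.update pair.2) s
        = PySem.Set.update s (distance.flatMap (fun p => p.2)) := by
  intro distance
  induction distance with
  | nil => intro s; rfl
  | cons p t ih => intro s; simp [ih, PySem.Set.update_append]

-- A's dedup-and-count loop, characterised: the seen list becomes Set.update s ids, and counts
-- is bumped once for each NEW element (in first-occurrence order).
lemma pv_achain :
    ∀ (ids : List Int) (d : PySem.Dict Int Int) (s : List Int),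
      ids.foldl pvAStep (d, s)
        = (((PySem.Set.update s ids).drop s.length).foldl pvInc d, PySem.Set.update s ids) := by
  intro ids
  induction ids with
  | nil =>
    intro d s
    simp [PySem.Set.update, List.drop_length]
  | cons id rest ih =>
    intro d s
    rw [List.foldl_cons, PySem.Set.update_cons]
    by_cases hid : id ∈ s
    · have hstep : pvAStep (d, s) id = (d, s) := by simp [pvAStep, hid]
      rw [hstep, PySem.Set.add_of_mem hid, ih]
    · have hstep : pvAStep (d, s) id = (pvInc d id, s ++ [id]) := by
        by_cases hk : id ∈ d.keys
        · have hgd : d.insert id (d.getD id 0 + 1) = pvInc d id := rfl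
          simp [pvAStep, hid, hk, hgd]
        · have hc : d.contains id = false := by
            rcases h : d.contains id with _ | _
            · rfl
            · exact absurd ((PySem.Dict.contains_iff_mem_keys d id).mp h) hk
          have hgd : d.getD id 0 = 0 := PySem.Dict.getD_of_not_contains d 0 hc
          simp [pvAStep, hid, hk, pvInc, hgd]
      rw [hstep, PySem.Set.add_of_not_mem hid, ih]
      have hupd := PySem.Set.update_eq_append_filter (s ++ [id]) rest
      rw [hupd]
      have hd1 : ((s ++ [id]) ++ List.filter (fun y => !(PySem.Set.contains (s ++ [id]) y)) (PySem.Set.ofList rest)).drop s.length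
          = id :: List.filter (fun y => !(PySem.Set.contains (s ++ [id]) y)) (PySem.Set.ofList rest) := by
        rw [List.append_assoc, List.drop_left]
        rfl
      have hd2 : ((s ++ [id]) ++ List.filter (fun y => !(PySem.Set.contains (s ++ [id]) y)) (PySem.Set.ofList rest)).drop (s ++ [id]).length
          = List.filter (fun y => !(PySem.Set.contains (s ++ [id]) y)) (PySem.Set.ofList rest) :=
        List.drop_left
      rw [hd1, hd2]
      simp

-- The two counting phases build the same dict.
lemma pv_counts_eq (pairs : List (List (Int × List Int))) : pvCountsA pairs = pvCountsB pairs := by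
  unfold pvCountsA pvCountsB
  apply PySem.List.foldl_congr_mem
  intro acc distance _
  rw [pv_foldl_flat pvAStep, pv_achain, pv_groupB_eq]
  simp [PySem.Set.update_nil_left, PySem.Set.empty]

-- A's enumerate-and-collect loop is a filter of the items followed by a key projection.
lemma pv_idsA_gen (m : Int) :
    ∀ (suffix : List (Int × Int)) (K : List Int) (j : Nat) (acc : List Int),
      (∀ i (h : i < suffix.length), K.getD (j + i) 0 = (suffix[i]).1) →
      ((suffix.map (fun p => p.2)).zipIdx j).foldl
          (fun acc ci => if ci.1 = m then acc ++ [PySem.List.pyGetD K ((ci.2 : Nat) : Int) 0] else acc) acc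
        = acc ++ (suffix.filter (fun p => decide (p.2 = m))).map (fun p => p.1) := by
  intro suffix
  induction suffix with
  | nil => intro K j acc _; simp
  | cons p t ih =>
    intro K j acc hK
    rw [List.map_cons, List.zipIdx_cons, List.foldl_cons]
    have h0 : PySem.List.pyGetD K ((j : Nat) : Int) 0 = p.1 := by
      rw [PySem.List.pyGetD_natCast]
      have := hK 0 (by simp)
      simpa using this
    have hK' : ∀ i (h : i < t.length), K.getD ((j + 1) + i) 0 = (t[i]).1 := by
      intro i h
      have := hK (i + 1) (by simpa using Nat.succ_lt_succ h)
      simpa [Nat.add_assoc, Nat.add_comm 1 i] using this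
    by_cases hp : p.2 = m
    · rw [if_pos hp, h0, ih K (j + 1) (acc ++ [p.1]) hK']
      simp [hp]
    · rw [if_neg hp, ih K (j + 1) acc hK']
      simp [hp]

-- The selection phases agree on every dict.
lemma pv_sel_eq (d : PySem.Dict Int Int) : pvSelectA d = pvSelectB d := by
  by_cases h2 : d.size < 2
  · unfold pvSelectA pvSelectB
    rw [if_pos h2, if_neg (by omega : ¬ 1 < d.size)]
    rw [if_pos (Or.inr (by norm_num))]
  · -- at least two distinct ids
    have hn : 2 ≤ d.items.length := by simpa [PySem.Dict.size] using Nat.le_of_not_lt h2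
    -- the maximum count exists
    obtain ⟨mv, hmv⟩ : ∃ mv, PySem.List.max? d.values (fun v => v) = some mv := by
      rcases h : PySem.List.max? d.values (fun v => v) with _ | mv
      · rw [PySem.List.max?_eq_none_iff] at h
        have : d.items.length = 0 := by simpa [PySem.Dict.values] using congrArg List.length h
        omega
      · exact ⟨mv, rfl⟩
    -- A's collected maxima list
    have hids : (d.values.zipIdx).foldl
        (fun acc ci => if ci.1 = mv then acc ++ [PySem.List.pyGetD d.keys ((ci.2 : Nat) : Int) 0] else acc) []
        = (d.items.filter (fun p => decide (p.2 = mv))).map (fun p => p.1) := by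
      have hK : ∀ i (h : i < d.items.length), d.keys.getD (0 + i) 0 = (d.items[i]).1 := by
        intro i h
        simp [PySem.Dict.keys, List.getD_eq_getElem?_getD, List.getElem?_map, List.getElem?_eq_getElem h]
      simpa [PySem.Dict.values] using pv_idsA_gen mv d.items d.keys 0 [] hK
    -- the sorted list: shape, permutation, order
    have hperm := PySem.List.sorted_perm d.items (fun p => p.2) true
    have hpw := PySem.List.sorted_pairwise_rev d.items (fun p => (p.2 : Int))
    have hlen : (PySem.List.sorted d.items (fun p => p.2) true).length = d.items.length := hperm.length_eq
    rcases hr : PySem.List.sorted d.items (fun p => p.2) true with _ | ⟨a, _ | ⟨b, rest⟩⟩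
    · rw [hr] at hlen; simp at hlen; omega
    · rw [hr] at hlen; simp at hlen; omega
    rw [hr] at hperm hpw
    have hab : b.2 ≤ a.2 := (List.pairwise_cons.mp hpw).1 b (by simp)
    have hrest : ∀ c ∈ rest, c.2 ≤ b.2 :=
      fun c hc => (List.pairwise_cons.mp (List.pairwise_cons.mp hpw).2).1 c hc
    have halla : ∀ c ∈ b :: rest, c.2 ≤ a.2 := (List.pairwise_cons.mp hpw).1
    -- mv = a.2
    have hma : mv = a.2 := by
      have hle : a.2 ≤ mv := by
        have hamem : a ∈ d.items := hperm.subset (by simp)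
        have : a.2 ∈ d.values := by
          simp only [PySem.Dict.values]
          exact List.mem_map.mpr ⟨a, hamem, rfl⟩
        exact PySem.List.max?_isMax hmv a.2 this
      have hge : mv ≤ a.2 := by
        have hmem : mv ∈ d.values := PySem.List.max?_mem hmv
        obtain ⟨p, hp, hpv⟩ := List.mem_map.mp (show mv ∈ List.map (fun p : Int × Int => p.2) d.items from hmem)
        have hpr : p ∈ a :: b :: rest := hperm.mem_iff.mpr hp
        rcases List.mem_cons.mp hpr with h | h
        · subst h; omega
        · have := halla p h; omega
      omega
    -- both sides expose the head of the sorted list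
    simp only [pvSelectA, pvSelectB]
    rw [if_pos (show 1 < d.size by omega), if_neg h2, hr]
    simp only [hmv, Option.getD_some]
    rw [hids]
    have htop0 : PySem.List.pyGetD (a :: b :: rest) 0 ((0 : Int), (0 : Int)) = a :=
      PySem.List.pyGetD_zero_cons a _ _
    have htop1 : PySem.List.pyGetD (a :: b :: rest) 1 ((0 : Int), (0 : Int)) = b := by
      rw [PySem.List.pyGetD_ofNat']; rfl
    rw [htop0, htop1]
    -- countP of the maxima, transported through the permutation
    have hcnt : (d.items.filter (fun p => decide (p.2 = mv))).length
        = ((a :: b :: rest).filter (fun p => decide (p.2 = mv))).length :=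
      ((hperm.filter (fun p => decide (p.2 = mv))).length_eq).symm
    by_cases htop : 3 ≤ a.2 ∧ b.2 < a.2
    · -- unique maximum with count ≥ 3: both return a.1
      rw [if_pos htop]
      have hrest0 : ((b :: rest).filter (fun p => decide (p.2 = mv))).length = 0 := by
        rw [List.length_eq_zero_iff, List.filter_eq_nil_iff]
        intro c hc
        have : c.2 ≤ b.2 := by
          rcases List.mem_cons.mp hc with h | h
          · subst h; omega
          · exact hrest c h
        simp; omega
      have hone : ((a :: b :: rest).filter (fun p => decide (p.2 = mv))).length = 1 := by
        rw [List.filter_cons_of_pos (by simp [hma])]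
        simp [hrest0]
      have hlen1 : (d.items.filter (fun p => decide (p.2 = mv))).length = 1 := by omega
      obtain ⟨p0, hp0⟩ := List.length_eq_one_iff.mp hlen1
      have hamem : a ∈ d.items.filter (fun p => decide (p.2 = mv)) := by
        rw [List.mem_filter]
        exact ⟨hperm.subset (by simp), by simp [hma]⟩
      rw [hp0] at hamem
      have hpa : p0 = a := (List.mem_singleton.mp hamem).symm
      rw [hp0, hpa]
      rw [if_neg (by simp; omega)]
      simp
    · rw [if_neg htop]
      by_cases h3 : a.2 < 3
      · rw [if_pos (Or.inr (by omega))]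
      · -- tie at the maximum: at least two collected ids
        have hbe : b.2 = a.2 := by omega
        have htwo : 2 ≤ ((a :: b :: rest).filter (fun p => decide (p.2 = mv))).length := by
          rw [List.filter_cons_of_pos (by simp [hma]), List.filter_cons_of_pos (by simp [hma, hbe])]
          simp
        rw [if_pos (Or.inl (by simp only [List.length_map]; omega))]

-- ===== VERDICT (by name: the statement is the Claim_ definition above) =====
theorem find_pole_in_pairs_spec : Claim_equal_find_pole_in_pairs := by
  intro pairs _
  unfold Spec_find_pole_in_pairs find_pole_in_pairs find_pole_in_pairs_alt
  rw [pv_counts_eq, pv_sel_eq]
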